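-- pv_equiv track=rewrite | github.com/Pinheiro/Advent-of-Code | 2015/Day 11/Part 1.py | c3
-- ===== SOURCE A (Python) =====
-- length = 8
--
-- def c3(psw):
--     firstPair = False
--     firstLetter = ''
--     secondPair = False
--     for i in range(length - 1):
--         if firstPair and (firstLetter != psw[i]) and (psw[i] == psw[i + 1]):
--             secondPair = True
--             break
--         if (psw[i] == psw[i + 1]):
--             firstPair = True
--             firstLetter = psw[i]
--     return secondPair
-- ===== SOURCE B (Python) =====
-- length = 8
--
-- def c3(psw):
--     window = [psw[i] for i in range(length)]
--     pairs = {a for a, b in zip(window, window[1:]) if a == b}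
--     return len(pairs) >= 2
-- ===== Notes on version B (the rewrite author's own statement) =====
-- stated objective: simpler
-- what changed: Replaces A's stateful scan with flags, a remembered first-pair letter and an early break by a staged pipeline: read the fixed 8-char window, zip it with its shifted self, collect the letters of adjacent-equal pairs into a set, and test its cardinality.
-- outside the precondition, e.g. on c3('aabb'): A returns True, B raises IndexError
import Mathlib
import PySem

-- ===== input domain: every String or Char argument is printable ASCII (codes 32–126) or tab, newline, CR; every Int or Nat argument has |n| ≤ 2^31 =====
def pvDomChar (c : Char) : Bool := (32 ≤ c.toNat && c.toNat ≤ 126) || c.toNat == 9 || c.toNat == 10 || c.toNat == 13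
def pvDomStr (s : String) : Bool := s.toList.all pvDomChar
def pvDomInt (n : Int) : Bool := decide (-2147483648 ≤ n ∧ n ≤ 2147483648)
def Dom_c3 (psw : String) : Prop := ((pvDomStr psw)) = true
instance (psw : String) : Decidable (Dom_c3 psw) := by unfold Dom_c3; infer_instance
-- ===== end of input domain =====

-- B replaces A's stateful indexed loop (two flags, a remembered letter, an early break) by a
-- staged pipeline: read the fixed 8-char window, zip it with its shifted self, collect the pair
-- letters into a set, test its cardinality. Objective: simpler.

-- ===== PORT A =====
-- module constant `length = 8`
def pyLength : Nat := 8

-- the for-loop over range(length-1) as fuel recursion; state = (firstPair, firstLetter); the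
-- break returns true, loop exhaustion returns secondPair = false.
-- firstLetter : Option Char models Python's '' (none) vs a one-char string (some c).
-- PySem.Str.pyGet? is exactly psw[i]; the `none` branch is Python's IndexError, excluded
-- by Pre_c3 (the port returns false there, a value never claimed for Python A).
def c3Loop (psw : String) (fuel : Nat) (i : Int) (firstPair : Bool) (firstLetter : Option Char) : Bool :=
  match fuel with
  | 0 => false
  | fuel' + 1 =>
    match PySem.Str.pyGet? psw i, PySem.Str.pyGet? psw (i+1) with
    | some a, some b =>
      if firstPair && !(firstLetter == some a) && (a == b) then true
      else if a == b then c3Loop psw fuel' (i+1) true (some a)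
      else c3Loop psw fuel' (i+1) firstPair firstLetter
    | _, _ => false

def c3 (psw : String) : Bool := c3Loop psw (pyLength - 1) 0 false none

-- ===== PORT B =====
-- window = [psw[i] for i in range(length)] — the comprehension reads the characters in order
-- and Python raises IndexError at the first out-of-range i: `none` is exactly that IndexError,
-- excluded by Pre_c3 (the port returns false there, a value never claimed for Python B).
def windowChars (psw : String) (fuel : Nat) (i : Int) : Option (List Char) :=
  match fuel with
  | 0 => some []
  | f + 1 =>
    match PySem.Str.pyGet? psw i with
    | none => none
    | some c => (windowChars psw f (i + 1)).map (c :: ·)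

-- pairs = {a for a, b in zip(window, window[1:]) if a == b}; return len(pairs) >= 2
def c3_alt (psw : String) : Bool :=
  match windowChars psw pyLength 0 with
  | none => false
  | some window =>
    decide (2 ≤ (PySem.Set.ofList
      (((window.zip (PySem.List.slice window (some 1) none)).filter
          (fun p => p.1 == p.2)).map Prod.fst)).length)

-- ===== PRECONDITION & SPEC =====
-- Pre_c3 excludes (besides the short strings on which both programs raise IndexError) the
-- strings shorter than 8 on which A's early break accidentally returns True just before the
-- IndexError every other short string triggers; B reads the full 8-char window and raises
-- IndexError there, so those accidental returns lie outside the claim.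
def Pre_c3 (psw : String) : Prop := 8 ≤ PySem.Str.len psw
instance (psw : String) : Decidable (Pre_c3 psw) := by unfold Pre_c3; infer_instance

def pvWitness_c3 : String := "aabbccdd"

def Spec_c3 (psw : String) (out : Bool) : Prop := out = c3_alt psw
instance (psw : String) (out : Bool) : Decidable (Spec_c3 psw out) := by unfold Spec_c3; infer_instance

-- ===== CLAIM (what is proved, stated in full; the proofs are below) =====
def Claim_equal_c3 : Prop := ∀ (psw : String), Dom_c3 psw → Pre_c3 psw → Spec_c3 psw (c3 psw)
-- ===== LEMMAS AND PROOFS =====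

-- the letters of adjacent-equal pairs of a character list, in order (with multiplicity)
def pairLetters : List Char → List Char
  | a :: b :: t => if a == b then a :: pairLetters (b :: t) else pairLetters (b :: t)
  | _ => []

-- B's zip/filter/map pipeline computes pairLetters
lemma zip_filter_map_eq_pairLetters (l : List Char) :
    ((l.zip l.tail).filter (fun p => p.1 == p.2)).map Prod.fst = pairLetters l := by
  match l with
  | [] => rfl
  | [a] => rfl
  | a :: b :: t =>
    have ih := zip_filter_map_eq_pairLetters (b :: t)
    by_cases hab : a = b
    · simp [pairLetters, hab, List.zip] at ih ⊢; exact ih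
    · have : (a == b) = false := by simp [hab]
      simp [pairLetters, this, List.zip] at ih ⊢; exact ih

-- a set has ≥ 2 elements iff the underlying list holds an element differing from its head
lemma two_le_ofList_iff (a : Char) (r : List Char) :
    2 ≤ (PySem.Set.ofList (a :: r)).length ↔ r.any (fun d => !(d == a)) = true := by
  constructor
  · intro h2
    by_contra hany
    have hall : ∀ d ∈ r, d = a := by
      intro d hd
      by_contra hda
      exact hany (List.any_eq_true.mpr ⟨d, hd, by simp [hda]⟩)
    have hmem : ∀ x ∈ PySem.Set.ofList (a :: r), x = a := by
      intro x hx
      rcases List.mem_cons.mp ((PySem.Set.mem_ofList _ _).mp hx) with h | h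
      · exact h
      · exact hall x h
    have hnd := PySem.Set.nodup_ofList (a :: r)
    match hs : PySem.Set.ofList (a :: r) with
    | [] => rw [hs] at h2; simp at h2
    | [x] => rw [hs] at h2; simp at h2
    | x :: y :: t =>
      rw [hs] at hnd
      have hx : x = a := hmem x (by rw [hs]; exact List.mem_cons_self)
      have hy : y = a := hmem y (by rw [hs]; exact List.mem_cons_of_mem x List.mem_cons_self)
      simp [hx, hy] at hnd
  · intro hany
    obtain ⟨d, hd, hda⟩ := List.any_eq_true.mp hany
    have hda : d ≠ a := by simpa using hda
    have hamem : a ∈ PySem.Set.ofList (a :: r) :=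
      (PySem.Set.mem_ofList _ _).mpr List.mem_cons_self
    have hdmem : d ∈ PySem.Set.ofList (a :: r) :=
      (PySem.Set.mem_ofList _ _).mpr (List.mem_cons_of_mem a hd)
    match hs : PySem.Set.ofList (a :: r) with
    | [] => rw [hs] at hamem; simp at hamem
    | [x] =>
      rw [hs] at hamem hdmem
      simp at hamem hdmem
      exact absurd (hdmem.trans hamem.symm) hda
    | x :: y :: t => simp

-- common specification: two distinct pair letters
def twoPairs (l : List Char) : Bool :=
  match pairLetters l with
  | [] => false
  | a :: r => r.any (fun d => !(d == a))

-- A's loop over an explicit character list (same branches, same state)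
def lloop : Nat → Bool → Option Char → List Char → Bool
  | 0, _, _, _ => false
  | fuel' + 1, fp, fl, a :: b :: t =>
    if fp && !(fl == some a) && (a == b) then true
    else if a == b then lloop fuel' true (some a) (b :: t)
    else lloop fuel' fp fl (b :: t)
  | _ + 1, _, _, _ => false

-- bridge: c3Loop on the string = lloop on the dropped character list
lemma c3Loop_eq_lloop (fuel : Nat) : ∀ (psw : String) (n : Nat) (fp : Bool) (fl : Option Char),
    c3Loop psw fuel (n : Int) fp fl = lloop fuel fp fl (psw.toList.drop n) := by
  induction fuel with
  | zero => intro psw n fp fl; rfl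
  | succ fuel' ih =>
    intro psw n fp fl
    have h1 : PySem.Str.pyGet? psw (n : Int) = psw.toList[n]? := by simp
    have h2 : PySem.Str.pyGet? psw ((n : Int) + 1) = psw.toList[n + 1]? := by
      have : ((n : Int) + 1) = ((n + 1 : Nat) : Int) := by push_cast; ring
      rw [this]; simp only [PySem.Str.pyGet?_natCast]
    match hd : psw.toList.drop n with
    | [] =>
      have ha : psw.toList[n]? = none := by
        rw [List.getElem?_eq_none_iff]
        have := List.drop_eq_nil_iff.mp hd
        omega
      unfold c3Loop
      rw [h1, ha]
      cases h2' : PySem.Str.pyGet? psw ((n : Int) + 1) <;> rfl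
    | [a] =>
      have hlen : psw.toList.length = n + 1 := by
        have h1' := congrArg List.length hd
        rw [List.length_drop] at h1'
        simp only [List.length_cons, List.length_nil] at h1'
        omega
      have ha : psw.toList[n]? = some a := by
        have : psw.toList[n]? = (psw.toList.drop n)[0]? := by
          simp [List.getElem?_drop]
        rw [this, hd]; rfl
      have hb : psw.toList[n+1]? = none := by
        rw [List.getElem?_eq_none_iff]; omega
      unfold c3Loop
      rw [h1, h2, ha, hb]
      rfl
    | a :: b :: t =>
      have ha : psw.toList[n]? = some a := by
        have : psw.toList[n]? = (psw.toList.drop n)[0]? := by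
          simp [List.getElem?_drop]
        rw [this, hd]; rfl
      have hb : psw.toList[n+1]? = some b := by
        have : psw.toList[n+1]? = (psw.toList.drop n)[1]? := by
          simp [List.getElem?_drop]
        rw [this, hd]; rfl
      have hd' : psw.toList.drop (n + 1) = b :: t := by
        have : psw.toList.drop (n + 1) = (psw.toList.drop n).tail := by
          rw [List.tail_drop]
        rw [this, hd]; rfl
      have e1 : (n : Int) + 1 = ((n + 1 : Nat) : Int) := by push_cast; ring
      unfold c3Loop
      rw [h1, h2, ha, hb]
      show (if fp && !(fl == some a) && (a == b) then true
            else if a == b then c3Loop psw fuel' ((n : Int) + 1) true (some a)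
            else c3Loop psw fuel' ((n : Int) + 1) fp fl)
          = lloop (fuel' + 1) fp fl (a :: b :: t)
      show _ = (if fp && !(fl == some a) && (a == b) then true
            else if a == b then lloop fuel' true (some a) (b :: t)
            else lloop fuel' fp fl (b :: t))
      rw [e1, ih psw (n + 1) true (some a), ih psw (n + 1) fp fl, hd']

-- semantics of lloop: over window take (fuel+1), with state (false, none) it decides twoPairs,
-- with state (true, some c) it decides "some pair letter differs from c"
lemma lloop_spec (fuel : Nat) : ∀ (l : List Char),
    lloop fuel false none l = twoPairs (l.take (fuel + 1)) ∧
    ∀ c : Char, lloop fuel true (some c) l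
      = (pairLetters (l.take (fuel + 1))).any (fun d => !(d == c)) := by
  induction fuel with
  | zero =>
    intro l
    constructor
    · match l with
      | [] => rfl
      | [a] => rfl
      | a :: b :: t => simp [lloop, twoPairs, List.take, pairLetters]
    · intro c
      match l with
      | [] => rfl
      | [a] => rfl
      | a :: b :: t => simp [lloop, List.take, pairLetters]
  | succ fuel' ih =>
    intro l
    match l with
    | [] => exact ⟨rfl, fun c => rfl⟩
    | [a] =>
      refine ⟨?_, fun c => ?_⟩ <;> simp [lloop, twoPairs, List.take, pairLetters]
    | a :: b :: t =>
      have htake : (a :: b :: t).take (fuel' + 1 + 1) = a :: ((b :: t).take (fuel' + 1)) := by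
        rfl
      constructor
      · by_cases hab : a = b
        · subst hab
          have hpl : pairLetters ((a :: a :: t).take (fuel' + 1 + 1))
              = a :: pairLetters ((a :: t).take (fuel' + 1)) := by
            rw [htake]
            match fuel', t with
            | 0, _ => simp [List.take, pairLetters]
            | m + 1, [] => simp [List.take, pairLetters]
            | m + 1, x :: t' => simp [List.take, pairLetters]
          simp only [lloop, Bool.false_and, Bool.false_eq_true, if_false, beq_self_eq_true,
            if_true, twoPairs, hpl]
          exact (ih (a :: t)).2 a
        · have hne : (a == b) = false := by simp [hab]
          have hpl : pairLetters ((a :: b :: t).take (fuel' + 1 + 1))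
              = pairLetters ((b :: t).take (fuel' + 1)) := by
            rw [htake]
            match fuel', t with
            | 0, _ => simp [List.take, pairLetters, hne]
            | m + 1, [] => simp [List.take, pairLetters, hne]
            | m + 1, x :: t' => simp [List.take, pairLetters, hne]
          simp only [lloop, hne, Bool.and_false, Bool.false_eq_true, if_false, twoPairs, hpl]
          exact (ih (b :: t)).1
      · intro c
        by_cases hab : a = b
        · subst hab
          have hpl : pairLetters ((a :: a :: t).take (fuel' + 1 + 1))
              = a :: pairLetters ((a :: t).take (fuel' + 1)) := by
            rw [htake]
            match fuel', t with
            | 0, _ => simp [List.take, pairLetters]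
            | m + 1, [] => simp [List.take, pairLetters]
            | m + 1, x :: t' => simp [List.take, pairLetters]
          by_cases hca : c = a
          · simp only [lloop, hca, beq_self_eq_true, Bool.not_true, Bool.and_false,
              Bool.false_and, Bool.false_eq_true, if_false, if_true, hpl, List.any_cons,
              Bool.not_true, Bool.false_or]
            simpa using (ih (a :: t)).2 a
          · have : ((some c : Option Char) == some a) = false := by simp [hca]
            simp only [lloop, this]
            simp
            exact ⟨a, by simp [pairLetters], fun h => hca h.symm⟩
        · have hne : (a == b) = false := by simp [hab]
          have hpl : pairLetters ((a :: b :: t).take (fuel' + 1 + 1))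
              = pairLetters ((b :: t).take (fuel' + 1)) := by
            rw [htake]
            match fuel', t with
            | 0, _ => simp [List.take, pairLetters, hne]
            | m + 1, [] => simp [List.take, pairLetters, hne]
            | m + 1, x :: t' => simp [List.take, pairLetters, hne]
          simp only [lloop, hne, Bool.and_false, Bool.false_eq_true, if_false, hpl]
          exact (ih (b :: t)).2 c

-- reading the window succeeds on a long-enough string and yields the first `fuel` characters
lemma windowChars_eq (fuel : Nat) : ∀ (psw : String) (n : Nat), n + fuel ≤ psw.toList.length →
    windowChars psw fuel (n : Int) = some ((psw.toList.drop n).take fuel) := by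
  induction fuel with
  | zero => intro psw n h; simp [windowChars]
  | succ f ih =>
    intro psw n h
    have hn : n < psw.toList.length := by omega
    have ha : PySem.Str.pyGet? psw (n : Int) = some psw.toList[n] := by
      simp [List.getElem?_eq_getElem hn]
    have e1 : (n : Int) + 1 = ((n + 1 : Nat) : Int) := by push_cast; ring
    unfold windowChars
    rw [ha, e1, ih psw (n + 1) (by omega)]
    simp only [Option.map_some]
    rw [List.drop_eq_getElem_cons hn, List.take_succ_cons]

-- on Pre_c3, B decides twoPairs of the 8-char window
lemma c3_alt_eq_twoPairs (psw : String) (h : 8 ≤ psw.toList.length) :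
    c3_alt psw = twoPairs (psw.toList.take 8) := by
  unfold c3_alt pyLength
  rw [show (0 : Int) = ((0 : Nat) : Int) from rfl, windowChars_eq 8 psw 0 (by omega)]
  simp only [List.drop_zero]
  show decide (2 ≤ (PySem.Set.ofList
      ((((psw.toList.take 8).zip (PySem.List.slice (psw.toList.take 8) (some 1) none)).filter
          (fun p => p.1 == p.2)).map Prod.fst)).length) = twoPairs (psw.toList.take 8)
  rw [PySem.List.slice_from_one, zip_filter_map_eq_pairLetters]
  unfold twoPairs
  match hpl : pairLetters (psw.toList.take 8) with
  | [] => rfl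
  | a :: r =>
    show decide (2 ≤ (PySem.Set.ofList (a :: r)).length) = r.any (fun d => !(d == a))
    by_cases h2 : 2 ≤ (PySem.Set.ofList (a :: r)).length
    · rw [decide_eq_true h2, (two_le_ofList_iff a r).mp h2]
    · rw [decide_eq_false h2]
      cases hb : r.any (fun d => !(d == a)) with
      | false => rfl
      | true => exact absurd ((two_le_ofList_iff a r).mpr hb) h2

-- ===== VERDICT (by name: the statement is the Claim_ definition above) =====
theorem c3_spec : Claim_equal_c3 := by
  intro psw _ hp
  show c3 psw = c3_alt psw
  have h8 : 8 ≤ psw.toList.length := by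
    unfold Pre_c3 at hp
    simpa using hp
  unfold c3 pyLength
  rw [show (0 : Int) = ((0 : Nat) : Int) from rfl, c3Loop_eq_lloop 7 psw 0 false none]
  simp only [List.drop_zero]
  rw [(lloop_spec 7 psw.toList).1, c3_alt_eq_twoPairs psw h8]
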